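-- pv_equiv track=rewrite | github.com/Ace1928/eidosian_forge | archive_forge/src/archive_forge/func_parse_precision.py | parse_precision
-- ===== SOURCE A (Python) =====
-- def parse_precision(p):
--     """Calculate the min and max allowed digits"""
--     min = max = 0
--     for c in p:
--         if c in '@0':
--             min += 1
--             max += 1
--         elif c == '#':
--             max += 1
--         elif c == ',':
--             continue
--         else:
--             break
--     return (min, max)
-- ===== SOURCE B (Python) =====
-- from itertools import takewhile
--
-- def parse_precision(p):
--     """Calculate the min and max allowed digits"""
--     prefix = list(takewhile(lambda c: c in '@0#,', p))
--     lo = sum(1 for c in prefix if c in '@0')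
--     return (lo, lo + prefix.count('#'))
-- ===== Notes on version B (the rewrite author's own statement) =====
-- stated objective: simpler
-- what changed: Replaces the single branching loop with break/continue by a two-pass decomposition: takewhile extracts the valid prefix, then two independent counts over it give min and max.
import Mathlib
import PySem

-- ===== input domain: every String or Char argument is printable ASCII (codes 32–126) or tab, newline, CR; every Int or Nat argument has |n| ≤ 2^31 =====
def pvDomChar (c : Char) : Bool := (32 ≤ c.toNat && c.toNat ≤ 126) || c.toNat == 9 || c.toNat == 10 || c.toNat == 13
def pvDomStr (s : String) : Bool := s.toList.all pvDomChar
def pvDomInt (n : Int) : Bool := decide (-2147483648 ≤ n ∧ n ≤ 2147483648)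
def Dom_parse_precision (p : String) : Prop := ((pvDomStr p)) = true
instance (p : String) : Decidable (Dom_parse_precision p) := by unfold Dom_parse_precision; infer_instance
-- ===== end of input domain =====

-- B replaces A's single branching loop (with break/continue) by a takewhile-prefix
-- plus two independent counts; objective: simpler decomposition.

-- ===== PORT A =====
-- A's for-loop with break: structural recursion carrying the (min, max) accumulators.
def parsePrecLoopA : List Char → Int → Int → Int × Int
  | [], mn, mx => (mn, mx)
  | c :: rest, mn, mx =>
    if c = '@' ∨ c = '0' then parsePrecLoopA rest (mn + 1) (mx + 1)
    else if c = '#' then parsePrecLoopA rest mn (mx + 1)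
    else if c = ',' then parsePrecLoopA rest mn mx
    else (mn, mx)

def parse_precision (p : String) : Int × Int :=
  parsePrecLoopA p.toList 0 0

-- ===== PORT B =====
-- takewhile over the placeholder alphabet, then two counts over the prefix.
def parse_precision_alt (p : String) : Int × Int :=
  let pre := p.toList.takeWhile (fun c => c = '@' ∨ c = '0' ∨ c = '#' ∨ c = ',')
  let lo : Int := pre.countP (fun c => c = '@' ∨ c = '0')
  (lo, lo + pre.count '#')

-- ===== PRECONDITION & SPEC =====
def Spec_parse_precision (p : String) (out : Int × Int) : Prop := out = parse_precision_alt p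
instance (p : String) (out : Int × Int) : Decidable (Spec_parse_precision p out) := by unfold Spec_parse_precision; infer_instance

-- ===== CLAIM =====
def Claim_equal_parse_precision : Prop := ∀ (p : String), Dom_parse_precision p → Spec_parse_precision p (parse_precision p)

-- ===== LEMMAS AND PROOFS =====
theorem parsePrecLoopA_eq (cs : List Char) : ∀ (mn mx : Int),
    parsePrecLoopA cs mn mx =
      (mn + (cs.takeWhile (fun c => c = '@' ∨ c = '0' ∨ c = '#' ∨ c = ',')).countP
              (fun c => c = '@' ∨ c = '0'),
       mx + (cs.takeWhile (fun c => c = '@' ∨ c = '0' ∨ c = '#' ∨ c = ',')).countP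
              (fun c => c = '@' ∨ c = '0')
          + (cs.takeWhile (fun c => c = '@' ∨ c = '0' ∨ c = '#' ∨ c = ',')).count '#') := by
  induction cs with
  | nil => intro mn mx; simp [parsePrecLoopA]
  | cons c rest ih =>
    intro mn mx
    by_cases h1 : c = '@'
    · subst h1
      simp [parsePrecLoopA, ih]
      constructor <;> ring
    by_cases h0 : c = '0'
    · subst h0
      simp [parsePrecLoopA, ih]
      constructor <;> ring
    by_cases hh : c = '#'
    · subst hh
      simp [parsePrecLoopA, h1, h0, ih]
      ring
    by_cases hcm : c = ','
    · subst hcm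
      simp [parsePrecLoopA, h1, h0, hh, ih]
    · simp [parsePrecLoopA, h1, h0, hh, hcm]

-- ===== VERDICT =====
theorem parse_precision_spec : Claim_equal_parse_precision := by
  intro p _
  unfold Spec_parse_precision parse_precision parse_precision_alt
  simp [parsePrecLoopA_eq]
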